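-- pv_equiv track=rewrite | github.com/ckf42/leetcode-code | sol/2684/2684.py | maxMoves
-- ===== SOURCE A (Python) =====
-- from typing import List
--
-- def maxMoves(grid: List[List[int]]) -> int:
--     m = len(grid)
--     n = len(grid[0])
--     memo = [set(range(m)), set()]
--     r, w = 0, 1
--     for j in range(n - 1):
--         memo[w].clear()
--         while len(memo[r]) != 0:
--             i = memo[r].pop()
--             if i != 0 and grid[i][j] < grid[i - 1][j + 1]:
--                 memo[w].add(i - 1)
--             if grid[i][j] < grid[i][j + 1]:
--                 memo[w].add(i)
--             if i != m - 1 and grid[i][j] < grid[i + 1][j + 1]: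
--                 memo[w].add(i + 1)
--         if len(memo[w]) == 0:
--             return j
--         r ^= 1
--         w ^= 1
--     return n - 1
-- ===== SOURCE B (Python) =====
-- from typing import List
--
-- def maxMoves(grid: List[List[int]]) -> int:
--     # Bottom-up DP right-to-left: reach[i] = max column index reachable from (i, j).
--     m = len(grid)
--     n = len(grid[0])
--     reach = [n - 1] * m
--     for j in range(n - 2, -1, -1):
--         nxt = reach
--         reach = []
--         for i in range(m):
--             best = j
--             v = grid[i][j]
--             for k in (i - 1, i, i + 1):
--                 if 0 <= k < m and v < grid[k][j + 1]:
--                     if nxt[k] > best: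
--                         best = nxt[k]
--             reach.append(best)
--     return max(reach)
-- ===== Notes on version B (the rewrite author's own statement) =====
-- stated objective: alternative
-- what changed: Replaces A's left-to-right frontier BFS over double-buffered sets (returning the column where the frontier dies) by a right-to-left per-row dynamic program that computes for every cell the maximum column index reachable from it and returns the maximum over column 0.
-- outside the precondition, e.g. on maxMoves([[1, 0, 0], [0, 0]]): A returns 0, B raises IndexError
import Mathlib
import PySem

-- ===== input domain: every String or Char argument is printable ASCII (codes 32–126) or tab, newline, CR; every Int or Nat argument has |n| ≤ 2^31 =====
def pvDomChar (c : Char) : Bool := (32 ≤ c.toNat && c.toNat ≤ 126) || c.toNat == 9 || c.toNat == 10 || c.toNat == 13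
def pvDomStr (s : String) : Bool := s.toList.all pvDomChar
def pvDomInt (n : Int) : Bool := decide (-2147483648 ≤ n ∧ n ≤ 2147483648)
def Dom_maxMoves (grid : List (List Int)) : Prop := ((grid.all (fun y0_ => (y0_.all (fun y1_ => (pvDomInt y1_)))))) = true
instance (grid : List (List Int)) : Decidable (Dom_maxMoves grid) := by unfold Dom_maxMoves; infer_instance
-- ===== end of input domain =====

-- B replaces A's left-to-right frontier BFS by a right-to-left per-row DP of maximum
-- reachable column indices (objective: alternative; return value only, no mutation).

-- grid[i][j]; exact while 0 ≤ i < len(grid) and 0 ≤ j < len(grid[i]) (all accesses made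
-- by either program inside Pre_ are in range, so the .getD defaults are never observed there)
def pvGet (grid : List (List Int)) (i j : Int) : Int :=
  (PySem.List.pyGet? ((PySem.List.pyGet? grid i).getD []) j).getD 0

-- ===== PORT A =====
-- the inner `while len(memo[r]) != 0:` loop draining the read set into the write set
-- (set.pop order does not affect the built set's membership, hence not the result)
def pvStep (grid : List (List Int)) (m : Int) (j : Int) : List Int → PySem.Set Int → PySem.Set Int
  | [], w => w
  | i :: rest, w =>
    let w1 := if i ≠ 0 ∧ pvGet grid i j < pvGet grid (i - 1) (j + 1) then PySem.Set.add w (i - 1) else w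
    let w2 := if pvGet grid i j < pvGet grid i (j + 1) then PySem.Set.add w1 i else w1
    let w3 := if i ≠ m - 1 ∧ pvGet grid i j < pvGet grid (i + 1) (j + 1) then PySem.Set.add w2 (i + 1) else w2
    pvStep grid m j rest w3

-- the outer `for j in range(n - 1):` loop, fuel = number of remaining iterations
def pvOuter (grid : List (List Int)) (m n : Int) : Nat → List Int → Int → Int
  | 0, _, _ => n - 1
  | k + 1, r, j =>
    let w := pvStep grid m j r PySem.Set.empty
    if w = [] then j else pvOuter grid m n k w (j + 1)

def maxMoves (grid : List (List Int)) : Int :=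
  let m : Int := (grid.length : Int)
  let n : Int := ((grid.headI).length : Int)
  pvOuter grid m n (n - 1).toNat (PySem.Set.ofList ((List.range grid.length).map (fun i : Nat => (i : Int)))) 0

-- ===== PORT B =====
-- `for k in (i-1, i, i+1): if 0 <= k < m and v < grid[k][j+1]: if nxt[k] > best: best = nxt[k]`
def pvBest (grid : List (List Int)) (m : Nat) (nxt : List Int) (i j : Nat) : Int :=
  [(i : Int) - 1, (i : Int), (i : Int) + 1].foldl
    (fun b k =>
      if 0 ≤ k ∧ k < (m : Int) ∧ pvGet grid (i : Int) (j : Int) < pvGet grid k ((j : Int) + 1) then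
        (if (PySem.List.pyGet? nxt k).getD 0 > b then (PySem.List.pyGet? nxt k).getD 0 else b)
      else b)
    (j : Int)

-- one iteration of the `for j in range(n-2,-1,-1):` loop: rebuild reach from nxt
def pvCol (grid : List (List Int)) (m : Nat) (j : Nat) (nxt : List Int) : List Int :=
  (List.range m).map (fun i => pvBest grid m nxt i j)

-- the column loop itself, processing columns jj-1, jj-2, …, 0
def pvDown (grid : List (List Int)) (m : Nat) : Nat → List Int → List Int
  | 0, r => r
  | jj + 1, r => pvDown grid m jj (pvCol grid m jj r)

def maxMoves_alt (grid : List (List Int)) : Int :=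
  let m := grid.length
  let n := (grid.headI).length
  let reach := pvDown grid m (n - 1) (List.replicate m ((n : Int) - 1))
  match reach with
  | [] => 0                 -- unreachable under Pre_ (m ≥ 1); Python's max([]) would raise
  | x :: xs => xs.foldl max x

-- ===== PRECONDITION & SPEC =====
-- Pre_ excludes the empty grid (A raises IndexError on grid[0]) and, when the first row has
-- at least 2 entries (so columns past 0 are probed at all), ragged grids having a row shorter
-- than the first row, on which the probes grid[k][j+1] typically raise IndexError.
def Pre_maxMoves (grid : List (List Int)) : Prop :=
  grid ≠ [] ∧ ((grid.headI).length ≤ 1 ∨ ∀ row ∈ grid, (grid.headI).length ≤ row.length)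
instance (grid : List (List Int)) : Decidable (Pre_maxMoves grid) := by unfold Pre_maxMoves; infer_instance

def pvWitness_maxMoves : List (List Int) := [[1, 2], [3, 4]]

def Spec_maxMoves (grid : List (List Int)) (out : Int) : Prop := out = maxMoves_alt grid
instance (grid : List (List Int)) (out : Int) : Decidable (Spec_maxMoves grid out) := by unfold Spec_maxMoves; infer_instance

-- ===== CLAIM (what is proved, stated in full; the proofs are below) =====
def Claim_equal_maxMoves : Prop := ∀ (grid : List (List Int)), Dom_maxMoves grid → Pre_maxMoves grid → Spec_maxMoves grid (maxMoves grid)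

-- ===== LEMMAS AND PROOFS =====

-- an edge of the move graph: from (i, column j) one may step to (k, column j+1)
def pvE (grid : List (List Int)) (m : Nat) (j : Nat) (i k : Int) : Prop :=
  0 ≤ k ∧ k < (m : Int) ∧ (k = i - 1 ∨ k = i ∨ k = i + 1) ∧
    pvGet grid i (j : Int) < pvGet grid k ((j : Int) + 1)

-- a chain of s moves starting at (i, column j) exists
def pvRT (grid : List (List Int)) (m : Nat) : Nat → Int → Nat → Prop
  | 0, _, _ => True
  | s + 1, i, j => ∃ k, pvE grid m j i k ∧ pvRT grid m s k (j + 1)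

-- row x is reachable at column j starting from some row of column 0
def pvRch (grid : List (List Int)) (m : Nat) : Nat → Int → Prop
  | 0, x => 0 ≤ x ∧ x < (m : Int)
  | j + 1, x => ∃ i, pvRch grid m j i ∧ pvE grid m j i x

-- the value B's DP assigns to row i of column n-1-t
def vv (grid : List (List Int)) (m n : Nat) : Nat → Nat → Int
  | 0, _ => (n : Int) - 1
  | t + 1, i => pvBest grid m ((List.range m).map (fun i' => vv grid m n t i')) i (n - 2 - t)

-- what A's inner loop adds for a popped i
def pvAddCond (grid : List (List Int)) (m : Int) (j : Int) (i x : Int) : Prop :=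
  (i ≠ 0 ∧ pvGet grid i j < pvGet grid (i - 1) (j + 1) ∧ x = i - 1) ∨
  (pvGet grid i j < pvGet grid i (j + 1) ∧ x = i) ∨
  (i ≠ m - 1 ∧ pvGet grid i j < pvGet grid (i + 1) (j + 1) ∧ x = i + 1)

set_option maxHeartbeats 2000000 in
theorem mem_pvStep_one (grid : List (List Int)) (m j i : Int) (w : List Int) (x : Int) :
    x ∈ pvStep grid m j [i] w ↔ x ∈ w ∨ pvAddCond grid m j i x := by
  show x ∈ (let w1 := if i ≠ 0 ∧ pvGet grid i j < pvGet grid (i - 1) (j + 1) then PySem.Set.add w (i - 1) else w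
    let w2 := if pvGet grid i j < pvGet grid i (j + 1) then PySem.Set.add w1 i else w1
    let w3 := if i ≠ m - 1 ∧ pvGet grid i j < pvGet grid (i + 1) (j + 1) then PySem.Set.add w2 (i + 1) else w2
    w3) ↔ _
  simp only [pvAddCond]
  split_ifs with h1 h2 h3
  all_goals (try simp only [PySem.Set.mem_add])
  all_goals (constructor <;> intro h <;> tauto)

theorem mem_pvStep (grid : List (List Int)) (m j : Int) :
    ∀ (read w : List Int) (x : Int),
      x ∈ pvStep grid m j read w ↔ x ∈ w ∨ ∃ i ∈ read, pvAddCond grid m j i x := by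
  intro read
  induction read with
  | nil => intro w x; simp [pvStep]
  | cons i rest ih =>
    intro w x
    rw [show pvStep grid m j (i :: rest) w = pvStep grid m j rest (pvStep grid m j [i] w) from rfl,
      ih, mem_pvStep_one, List.exists_mem_cons_iff]
    tauto

theorem pvAddCond_iff (grid : List (List Int)) (m : Nat) (jN : Nat) (i x : Int)
    (h0 : 0 ≤ i) (h1 : i < (m : Int)) :
    pvAddCond grid (m : Int) (jN : Int) i x ↔ pvE grid m jN i x := by
  unfold pvAddCond pvE
  constructor
  · rintro (⟨hi, hlt, rfl⟩ | ⟨hlt, rfl⟩ | ⟨hi, hlt, rfl⟩)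
    · exact ⟨by omega, by omega, Or.inl rfl, hlt⟩
    · exact ⟨by omega, by omega, Or.inr (Or.inl rfl), hlt⟩
    · exact ⟨by omega, by omega, Or.inr (Or.inr rfl), hlt⟩
  · rintro ⟨hk0, hk1, (rfl | rfl | rfl), hlt⟩
    · exact Or.inl ⟨by omega, hlt, rfl⟩
    · exact Or.inr (Or.inl ⟨hlt, rfl⟩)
    · exact Or.inr (Or.inr ⟨by omega, hlt, rfl⟩)

theorem pvRch_bound (grid : List (List Int)) (m : Nat) :
    ∀ (j : Nat) (x : Int), pvRch grid m j x → 0 ≤ x ∧ x < (m : Int) := by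
  intro j
  cases j with
  | zero => intro x h; exact h
  | succ j => rintro x ⟨i, _, hE⟩; exact ⟨hE.1, hE.2.1⟩

theorem pvRT_pred (grid : List (List Int)) (m : Nat) :
    ∀ (s : Nat) (i : Int) (j : Nat), pvRT grid m (s + 1) i j → pvRT grid m s i j := by
  intro s
  induction s with
  | zero => intro i j _; trivial
  | succ s ih => rintro i j ⟨k, hE, hRT⟩; exact ⟨k, hE, ih k (j + 1) hRT⟩

theorem pvRT_mono (grid : List (List Int)) (m : Nat) (s c : Nat) (i : Int) (j : Nat)
    (h : pvRT grid m s i j) (hc : c ≤ s) : pvRT grid m c i j := by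
  obtain ⟨d, rfl⟩ := Nat.exists_eq_add_of_le hc
  clear hc
  induction d with
  | zero => exact h
  | succ d ih => exact ih (pvRT_pred grid m (c + d) i j h)

theorem pvRch_extend (grid : List (List Int)) (m : Nat) :
    ∀ (s j : Nat) (i : Int), pvRch grid m j i → pvRT grid m s i j →
      ∃ x, pvRch grid m (j + s) x := by
  intro s
  induction s with
  | zero => intro j i h _; exact ⟨i, h⟩
  | succ s ih =>
    rintro j i h ⟨k, hE, hRT⟩
    have hx := ih (j + 1) k ⟨i, h, hE⟩ hRT
    rwa [show j + 1 + s = j + (s + 1) by omega] at hx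

theorem pvRch_to_rt (grid : List (List Int)) (m : Nat) :
    ∀ (j : Nat) (x : Int) (s : Nat), pvRch grid m j x → pvRT grid m s x j →
      ∃ i0, pvRch grid m 0 i0 ∧ pvRT grid m (j + s) i0 0 := by
  intro j
  induction j with
  | zero => intro x s h hRT; exact ⟨x, h, by simpa using hRT⟩
  | succ j ih =>
    rintro x s ⟨i, hRch, hE⟩ hRT
    have hx := ih i (s + 1) hRch ⟨x, hE, hRT⟩
    rwa [show j + (s + 1) = j + 1 + s by omega] at hx

theorem pvBest_ge_j (grid : List (List Int)) (m : Nat) (nxt : List Int) (i j : Nat) :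
    (j : Int) ≤ pvBest grid m nxt i j := by
  simp only [pvBest, List.foldl]
  split_ifs <;> omega

theorem pvBest_ge (grid : List (List Int)) (m : Nat) (nxt : List Int) (i j : Nat) (k : Int)
    (hk : k ∈ ([(i : Int) - 1, (i : Int), (i : Int) + 1] : List Int))
    (hc : 0 ≤ k ∧ k < (m : Int) ∧ pvGet grid (i : Int) (j : Int) < pvGet grid k ((j : Int) + 1)) :
    (PySem.List.pyGet? nxt k).getD 0 ≤ pvBest grid m nxt i j := by
  simp only [List.mem_cons, List.not_mem_nil, or_false] at hk
  rcases hk with rfl | rfl | rfl <;>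
    (simp only [pvBest, List.foldl]; split_ifs <;> omega)

theorem pvBest_cases (grid : List (List Int)) (m : Nat) (nxt : List Int) (i j : Nat) :
    pvBest grid m nxt i j = (j : Int) ∨
      ∃ k, k ∈ ([(i : Int) - 1, (i : Int), (i : Int) + 1] : List Int) ∧
        (0 ≤ k ∧ k < (m : Int) ∧ pvGet grid (i : Int) (j : Int) < pvGet grid k ((j : Int) + 1)) ∧
        pvBest grid m nxt i j = (PySem.List.pyGet? nxt k).getD 0 := by
  simp only [pvBest, List.foldl]
  split_ifs <;>
    first
      | exact Or.inl rfl
      | exact Or.inr ⟨(i : Int) - 1, by simp, by assumption, rfl⟩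
      | exact Or.inr ⟨(i : Int), by simp, by assumption, rfl⟩
      | exact Or.inr ⟨(i : Int) + 1, by simp, by assumption, rfl⟩

theorem pvMapVal (m : Nat) (f : Nat → Int) (k : Int) (h0 : 0 ≤ k) (h1 : k < (m : Int)) :
    (PySem.List.pyGet? ((List.range m).map f) k).getD 0 = f k.toNat := by
  obtain ⟨kn, rfl⟩ := Int.eq_ofNat_of_zero_le h0
  have hkn : kn < m := by exact_mod_cast h1
  simp [hkn]

theorem pvFold_le (grid : List (List Int)) (m : Nat) (nxt : List Int) (iv jv : Int) (B : Int)
    (hv : ∀ k : Int, 0 ≤ k → k < (m : Int) → (PySem.List.pyGet? nxt k).getD 0 ≤ B) :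
    ∀ (l : List Int) (b : Int), b ≤ B →
      l.foldl (fun b k =>
        if 0 ≤ k ∧ k < (m : Int) ∧ pvGet grid iv jv < pvGet grid k (jv + 1) then
          (if (PySem.List.pyGet? nxt k).getD 0 > b then (PySem.List.pyGet? nxt k).getD 0 else b)
        else b) b ≤ B := by
  intro l
  induction l with
  | nil => intro b hb; exact hb
  | cons k rest ih =>
    intro b hb
    refine ih _ ?_
    by_cases hc : 0 ≤ k ∧ k < (m : Int) ∧ pvGet grid iv jv < pvGet grid k (jv + 1)
    · have := hv k hc.1 hc.2.1
      simp only [if_pos hc]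
      split_ifs <;> omega
    · simp only [if_neg hc]; exact hb

theorem pvBest_le (grid : List (List Int)) (m : Nat) (nxt : List Int) (i j : Nat) (B : Int)
    (hj : (j : Int) ≤ B)
    (hv : ∀ k : Int, 0 ≤ k → k < (m : Int) → (PySem.List.pyGet? nxt k).getD 0 ≤ B) :
    pvBest grid m nxt i j ≤ B := by
  simpa [pvBest] using pvFold_le grid m nxt (i : Int) (j : Int) B hv
    [(i : Int) - 1, (i : Int), (i : Int) + 1] (j : Int) hj

theorem vv_le (grid : List (List Int)) (m n : Nat) (hn : 1 ≤ n) :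
    ∀ (t i : Nat), vv grid m n t i ≤ (n : Int) - 1 := by
  intro t
  induction t with
  | zero => intro i; simp [vv]
  | succ t ih =>
    intro i
    show pvBest grid m ((List.range m).map (fun i' => vv grid m n t i')) i (n - 2 - t) ≤ _
    refine pvBest_le grid m _ i (n - 2 - t) _ (by omega) ?_
    intro k h0 h1
    rw [pvMapVal m _ k h0 h1]
    exact ih _

theorem vvU (grid : List (List Int)) (m n : Nat) (hn : 1 ≤ n) :
    ∀ (t : Nat), t ≤ n - 1 → ∀ (i : Nat), i < m → ∀ (s : Nat), s ≤ t →
      pvRT grid m s (i : Int) (n - 1 - t) →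
      ((n - 1 - t : Nat) : Int) + (s : Int) ≤ vv grid m n t i := by
  intro t
  induction t with
  | zero =>
    intro _ i _ s hs _
    obtain rfl : s = 0 := Nat.le_zero.mp hs
    simp [vv]; omega
  | succ t ih =>
    intro ht i hi s hs hRT
    show _ ≤ pvBest grid m ((List.range m).map (fun i' => vv grid m n t i')) i (n - 2 - t)
    cases s with
    | zero =>
      have h := pvBest_ge_j grid m ((List.range m).map fun i' => vv grid m n t i') i (n - 2 - t)
      push_cast
      omega
    | succ s =>
      obtain ⟨k, hE, hRT'⟩ := hRT
      obtain ⟨hk0, hk1, hnb, hlt⟩ := hE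
      have hkn : k.toNat < m := by omega
      rw [show n - 1 - (t + 1) + 1 = n - 1 - t from by omega] at hRT'
      have hIH := ih (by omega) k.toNat hkn s (by omega) (by rwa [Int.toNat_of_nonneg hk0])
      have hval : (PySem.List.pyGet? ((List.range m).map (fun i' => vv grid m n t i')) k).getD 0
          = vv grid m n t k.toNat := pvMapVal m _ k hk0 (by exact_mod_cast hk1)
      have hge := pvBest_ge grid m ((List.range m).map fun i' => vv grid m n t i') i (n - 2 - t) k
        (by rcases hnb with h | h | h <;> simp [h])
        ⟨hk0, by exact_mod_cast hk1, by rw [show (n - 2 - t : Nat) = n - 1 - (t + 1) from by omega]; exact hlt⟩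
      rw [hval] at hge
      omega

theorem vvA (grid : List (List Int)) (m n : Nat) (hn : 1 ≤ n) :
    ∀ (t : Nat), t ≤ n - 1 → ∀ (i : Nat), i < m →
      ∃ s, s ≤ t ∧ pvRT grid m s (i : Int) (n - 1 - t) ∧
        vv grid m n t i = ((n - 1 - t : Nat) : Int) + (s : Int) := by
  intro t
  induction t with
  | zero =>
    intro _ i _
    refine ⟨0, le_refl _, trivial, ?_⟩
    simp [vv]; omega
  | succ t ih =>
    intro ht i hi
    rcases pvBest_cases grid m ((List.range m).map fun i' => vv grid m n t i') i (n - 2 - t) with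
      h | ⟨k, hkmem, ⟨hk0, hk1, hlt⟩, hval⟩
    · refine ⟨0, by omega, trivial, ?_⟩
      show pvBest grid m ((List.range m).map (fun i' => vv grid m n t i')) i (n - 2 - t) = _
      rw [h]; omega
    · have hkn : k.toNat < m := by omega
      obtain ⟨s, hs, hRT, hvv⟩ := ih (by omega) k.toNat hkn
      refine ⟨s + 1, by omega, ⟨k, ⟨hk0, hk1, ?_, ?_⟩, ?_⟩, ?_⟩
      · simpa using hkmem
      · rw [show (n - 1 - (t + 1) : Nat) = n - 2 - t from by omega]; exact hlt
      · rw [show n - 1 - (t + 1) + 1 = n - 1 - t from by omega]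
        rwa [Int.toNat_of_nonneg hk0] at hRT
      · show pvBest grid m ((List.range m).map (fun i' => vv grid m n t i')) i (n - 2 - t) = _
        rw [hval, pvMapVal m _ k hk0 (by exact_mod_cast hk1), hvv]
        omega

theorem pvDown_vv (grid : List (List Int)) (m n : Nat) :
    ∀ (jj : Nat), jj ≤ n - 1 →
      pvDown grid m jj ((List.range m).map (fun i => vv grid m n (n - 1 - jj) i)) =
        (List.range m).map (fun i => vv grid m n (n - 1) i) := by
  intro jj
  induction jj with
  | zero => intro _; rfl
  | succ jj ih =>
    intro h
    show pvDown grid m jj (pvCol grid m jj _) = _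
    have e2 : pvCol grid m jj ((List.range m).map (fun i => vv grid m n (n - 1 - (jj + 1)) i)) =
        (List.range m).map (fun i => vv grid m n (n - 1 - jj) i) := by
      unfold pvCol
      refine List.map_congr_left ?_
      intro i _
      rw [show (n - 1 - jj : Nat) = (n - 1 - (jj + 1)) + 1 from by omega]
      show pvBest grid m _ i jj = pvBest grid m _ i (n - 2 - (n - 1 - (jj + 1)))
      rw [show (n - 2 - (n - 1 - (jj + 1)) : Nat) = jj from by omega]
    rw [e2]
    exact ih (by omega)

theorem pvNE_iff (grid : List (List Int)) (m n : Nat) (hn : 1 ≤ n) (hm : 1 ≤ m) (M : Int)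
    (hMge : ∀ i, i < m → vv grid m n (n - 1) i ≤ M)
    (hMattain : ∃ i, i < m ∧ M = vv grid m n (n - 1) i) :
    ∀ c, c ≤ n - 1 → ((∃ x, pvRch grid m c x) ↔ (c : Int) ≤ M) := by
  intro c hc
  constructor
  · rintro ⟨x, hx⟩
    obtain ⟨i0, hRch0, hRT⟩ := pvRch_to_rt grid m c x 0 hx trivial
    have hb := pvRch_bound grid m 0 i0 hRch0
    have hU := vvU grid m n hn (n - 1) (le_refl _) i0.toNat (by omega) c hc
      (by rw [Nat.sub_self]; rwa [Int.toNat_of_nonneg hb.1])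
    rw [Nat.sub_self] at hU
    have hge := hMge i0.toNat (by omega)
    simp at hU
    omega
  · intro hcM
    obtain ⟨i0, hi0, hEq⟩ := hMattain
    obtain ⟨s, _, hRT, hvv⟩ := vvA grid m n hn (n - 1) (le_refl _) i0 hi0
    rw [Nat.sub_self] at hRT hvv
    have hcs : c ≤ s := by simp at hvv; omega
    have hRTc := pvRT_mono grid m s c (i0 : Int) 0 hRT hcs
    have hex := pvRch_extend grid m c 0 (i0 : Int)
      ⟨by omega, by exact_mod_cast hi0⟩ hRTc
    rwa [Nat.zero_add] at hex

theorem pvOuter_eq (grid : List (List Int)) (m n : Nat) (hn : 1 ≤ n) (M : Int)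
    (hNE : ∀ c, c ≤ n - 1 → ((∃ x, pvRch grid m c x) ↔ (c : Int) ≤ M))
    (hMle : M ≤ (n : Int) - 1) :
    ∀ (k jN : Nat) (r : List Int), jN + k = n - 1 →
      (∀ x, x ∈ r ↔ pvRch grid m jN x) → (jN : Int) ≤ M →
      pvOuter grid (m : Int) (n : Int) k r (jN : Int) = M := by
  intro k
  induction k with
  | zero =>
    intro jN r hk _ hle
    show (n : Int) - 1 = M
    omega
  | succ k ih =>
    intro jN r hk hmem hle
    have hw : ∀ x, x ∈ pvStep grid (m : Int) (jN : Int) r PySem.Set.empty ↔ pvRch grid m (jN + 1) x := by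
      intro x
      rw [mem_pvStep]
      constructor
      · rintro (hx | ⟨i, hir, hAC⟩)
        · simp [PySem.Set.empty] at hx
        · have hRch := (hmem i).1 hir
          have hb := pvRch_bound grid m jN i hRch
          exact ⟨i, hRch, (pvAddCond_iff grid m jN i x hb.1 hb.2).1 hAC⟩
      · rintro ⟨i, hRch, hE⟩
        have hb := pvRch_bound grid m jN i hRch
        exact Or.inr ⟨i, (hmem i).2 hRch, (pvAddCond_iff grid m jN i x hb.1 hb.2).2 hE⟩
    show (if pvStep grid (m : Int) (jN : Int) r PySem.Set.empty = [] then (jN : Int)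
      else pvOuter grid (m : Int) (n : Int) k (pvStep grid (m : Int) (jN : Int) r PySem.Set.empty) ((jN : Int) + 1)) = M
    by_cases hwe : pvStep grid (m : Int) (jN : Int) r PySem.Set.empty = []
    · rw [if_pos hwe]
      have hno : ¬ ∃ x, pvRch grid m (jN + 1) x := by
        rintro ⟨x, hx⟩
        have hmm := (hw x).2 hx
        rw [hwe] at hmm
        simp at hmm
      have hnle : ¬ ((jN + 1 : Nat) : Int) ≤ M := fun h => hno ((hNE (jN + 1) (by omega)).2 h)
      push_cast at hnle
      omega
    · rw [if_neg hwe]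
      have hx : ∃ x, pvRch grid m (jN + 1) x := by
        obtain ⟨x, hxw⟩ := List.exists_mem_of_ne_nil _ hwe
        exact ⟨x, (hw x).1 hxw⟩
      have hle' : ((jN + 1 : Nat) : Int) ≤ M := (hNE (jN + 1) (by omega)).1 hx
      have hrec := ih (jN + 1) (pvStep grid (m : Int) (jN : Int) r PySem.Set.empty) (by omega)
        (fun x => hw x) hle'
      rw [show ((jN : Int) + 1) = ((jN + 1 : Nat) : Int) from by push_cast; ring]
      exact hrec

theorem foldl_max_replicate (k : Nat) (a : Int) : (List.replicate k a).foldl max a = a := by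
  induction k with
  | zero => rfl
  | succ k ih => simpa [List.replicate_succ, max_self] using ih

theorem pv_main (grid : List (List Int)) (hne : grid ≠ []) : maxMoves grid = maxMoves_alt grid := by
  have hm : 1 ≤ grid.length := List.length_pos_of_ne_nil hne
  by_cases hn0 : (grid.headI).length = 0
  · -- no columns: both programs return -1
    obtain ⟨m', hm'⟩ : ∃ m', grid.length = m' + 1 := ⟨grid.length - 1, by omega⟩
    simp only [maxMoves, maxMoves_alt, hn0, hm']
    norm_num [pvDown, List.replicate_succ, foldl_max_replicate]
    rw [show ((-1 : Int)).toNat = 0 from rfl]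
    norm_num [pvOuter]
  · have hn : 1 ≤ (grid.headI).length := by omega
    obtain ⟨m', hm'⟩ : ∃ m', grid.length = m' + 1 := ⟨grid.length - 1, by omega⟩
    -- B's final DP row is the vector of vv-values
    have hconst : (List.range grid.length).map (fun i => vv grid grid.length (grid.headI).length 0 i) =
        List.replicate grid.length (((grid.headI).length : Int) - 1) := by
      rw [show (fun i => vv grid grid.length (grid.headI).length 0 i) =
        (fun _ : Nat => ((grid.headI).length : Int) - 1) from rfl]
      rw [List.map_const', List.length_range]
    have hdown := pvDown_vv grid grid.length (grid.headI).length ((grid.headI).length - 1) (le_refl _)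
    rw [Nat.sub_self, hconst] at hdown
    have halt : maxMoves_alt grid =
        (((List.range m').map Nat.succ).map (fun i => vv grid grid.length (grid.headI).length ((grid.headI).length - 1) i)).foldl
          max (vv grid grid.length (grid.headI).length ((grid.headI).length - 1) 0) := by
      simp only [maxMoves_alt]
      rw [hdown, hm', List.range_succ_eq_map, List.map_cons]
    have hMge : ∀ i, i < grid.length →
        vv grid grid.length (grid.headI).length ((grid.headI).length - 1) i ≤ maxMoves_alt grid := by
      intro i hi
      rw [halt]
      cases i with
      | zero => exact (PySem.List.le_foldl_max _ _).1
      | succ i' =>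
        refine (PySem.List.le_foldl_max _ _).2 _ ?_
        simp only [List.mem_map, List.mem_range]
        exact ⟨i' + 1, ⟨i', by omega, rfl⟩, rfl⟩
    have hMattain : ∃ i, i < grid.length ∧
        maxMoves_alt grid = vv grid grid.length (grid.headI).length ((grid.headI).length - 1) i := by
      rcases PySem.List.foldl_max_mem
        (((List.range m').map Nat.succ).map (fun i => vv grid grid.length (grid.headI).length ((grid.headI).length - 1) i))
        (vv grid grid.length (grid.headI).length ((grid.headI).length - 1) 0) with h | h
      · exact ⟨0, by omega, by rw [halt, h]⟩
      · simp only [List.mem_map, List.mem_range] at h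
        obtain ⟨i, ⟨⟨i', hi', rfl⟩, hv⟩⟩ := h
        exact ⟨i' + 1, by omega, by rw [halt, hv]⟩
    have hNE := pvNE_iff grid grid.length (grid.headI).length hn hm (maxMoves_alt grid) hMge hMattain
    have hMle : maxMoves_alt grid ≤ ((grid.headI).length : Int) - 1 := by
      obtain ⟨i, hi, hEq⟩ := hMattain
      rw [hEq]
      exact vv_le grid grid.length (grid.headI).length hn _ _
    have hinit : ∀ x, x ∈ PySem.Set.ofList ((List.range grid.length).map (fun i : Nat => (i : Int))) ↔
        pvRch grid grid.length 0 x := by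
      intro x
      show _ ↔ 0 ≤ x ∧ x < (grid.length : Int)
      constructor
      · intro hx
        obtain ⟨i, hi, rfl⟩ := List.exists_of_mem_map ((PySem.Set.mem_ofList _ _).mp hx)
        have h2 := List.mem_range.mp hi
        omega
      · intro hx
        refine (PySem.Set.mem_ofList _ _).mpr ?_
        have hxe : x = ((x.toNat : Nat) : Int) := by omega
        rw [hxe]
        exact List.mem_map_of_mem (List.mem_range.mpr (by omega))
    have h0M : ((0 : Nat) : Int) ≤ maxMoves_alt grid :=
      (hNE 0 (by omega)).1 ⟨0, by constructor <;> omega⟩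
    have houter := pvOuter_eq grid grid.length (grid.headI).length hn (maxMoves_alt grid) hNE hMle
      ((grid.headI).length - 1) 0
      (PySem.Set.ofList ((List.range grid.length).map (fun i : Nat => (i : Int))))
      (by omega) hinit h0M
    show pvOuter grid (grid.length : Int) ((grid.headI).length : Int)
        (((grid.headI).length : Int) - 1).toNat
        (PySem.Set.ofList ((List.range grid.length).map (fun i : Nat => (i : Int)))) 0 = maxMoves_alt grid
    rw [show ((((grid.headI).length : Int)) - 1).toNat = (grid.headI).length - 1 from by omega,
      show (0 : Int) = ((0 : Nat) : Int) from rfl]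
    exact houter

-- ===== VERDICT (by name: the statement is the Claim_ definition above) =====
theorem maxMoves_spec : Claim_equal_maxMoves := by
  intro grid _ hpre
  exact pv_main grid hpre.1
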